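-- pv_equiv track=rewrite | github.com/jano31415/codejam | codeforces/815_round_div2/probd.py | solve
-- ===== SOURCE A (Python) =====
-- def solve(n, arr):
--     dyn = [1] * len(arr)
--     for lasti, x in enumerate(dyn):
--         # if lasti > 1024:
--         #     break
--         endj = min(len(arr), lasti - lasti%256 + 256)
--         arrlasti = arr[lasti]
--         dynlasti = dyn[lasti]
--         dynlasti1 = dyn[lasti]+1
--         for j in range(lasti+1, endj):
--             # if j >= len(dyn):
--             #     continue
--             # if j >= len(arr):
--             #     continue
--             if arrlasti ^ j < arr[j] ^ lasti:
--                 if dyn[j] <= dynlasti: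
--                     dyn[j] = dynlasti1
--     return max(dyn)
-- ===== SOURCE B (Python) =====
-- def solve(n, arr):
--     # A's window never crosses a 256-block boundary, so the problem splits into
--     # independent 256-blocks; each is solved by top-down memoized recursion.
--     def best_chain(block, base):
--         memo = {}
--         get = memo.get
--         def f(g):
--             v = get(g)
--             if v is None:
--                 bj = block[g - base]
--                 best = 0
--                 for i, bi in zip(range(base, g), block):
--                     if bi ^ g < bj ^ i:
--                         fi = get(i)
--                         if fi is None:
--                             fi = f(i)
--                         if fi > best:
--                             best = fi
--                 v = best + 1
--                 memo[g] = v
--             return v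
--         return max(f(g) for g in range(base, base + len(block)))
--     return max(best_chain(arr[s:s + 256], s) for s in range(0, len(arr), 256))
-- ===== Notes on version B (the rewrite author's own statement) =====
-- stated objective: alternative
-- what changed: A runs one global in-place scatter DP over a length-n dyn array (each i pushes forward into later cells, with cached endj/dynlasti bookkeeping); B observes that A's window never crosses a 256-block boundary, so it slices the array into independent 256-blocks and solves each block by top-down memoized recursion over global indices, returning the max over blocks.
import Mathlib
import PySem

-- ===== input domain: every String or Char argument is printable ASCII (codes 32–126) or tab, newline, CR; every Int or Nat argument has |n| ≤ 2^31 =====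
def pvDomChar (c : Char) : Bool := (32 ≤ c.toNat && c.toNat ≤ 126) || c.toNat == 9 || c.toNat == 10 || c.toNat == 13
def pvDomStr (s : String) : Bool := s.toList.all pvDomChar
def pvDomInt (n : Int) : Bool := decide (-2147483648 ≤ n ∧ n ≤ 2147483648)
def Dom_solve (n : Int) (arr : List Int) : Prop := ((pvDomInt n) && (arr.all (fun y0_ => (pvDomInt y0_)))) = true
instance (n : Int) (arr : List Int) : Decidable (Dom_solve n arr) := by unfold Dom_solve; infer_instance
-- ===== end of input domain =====

-- B exploits that A's DP window never crosses a 256-block boundary: it splits the array into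
-- independent 256-blocks and solves each by top-down memoized recursion (different decomposition, same cost).


-- ===== PORT A =====
def solve (n : Int) (arr : List Int) : Int :=
  let dyn0 : List Int := List.replicate arr.length 1
  let dyn := (PySem.List.enumerate dyn0).foldl (fun dyn lx =>
    let lasti := lx.1
    let endj := min ((arr.length : Int)) (lasti - PySem.Int.mod lasti 256 + 256)
    let arrlasti := PySem.List.pyGetD arr lasti 0
    let dynlasti := PySem.List.pyGetD dyn lasti 0
    let dynlasti1 := dynlasti + 1
    (PySem.List.pyRange (lasti + 1) endj 1).foldl (fun dyn j =>
      if PySem.Int.bxor arrlasti j < PySem.Int.bxor (PySem.List.pyGetD arr j 0) lasti then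
        if PySem.List.pyGetD dyn j 0 ≤ dynlasti then PySem.List.pySetD dyn j dynlasti1
        else dyn
      else dyn) dyn) dyn0
  (PySem.List.max? dyn (fun x => x)).getD 0   -- max([]) raises: empty arr excluded by Pre_

-- ===== PORT B =====
-- Source B's inner f(g): the memo dict (and the in-loop memo short-circuit) caches a pure
-- recursion on the global index g; ported as that recursion itself (same values);
-- bj = block[g - base] is inlined.
def bestF (block : List Int) (base : Int) (g : Int) : Int :=
  1 + ((PySem.List.pyRange base g 1).zip block).attach.foldl
    (fun best p =>
      if PySem.Int.bxor p.1.2 g < PySem.Int.bxor (PySem.List.pyGetD block (g - base) 0) p.1.1 then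
        max best (bestF block base p.1.1)
      else best) 0
termination_by (g - base).toNat
decreasing_by
  rcases p with ⟨⟨i, bi⟩, hp⟩
  have h2 := PySem.List.mem_pyRange_one.1 (List.of_mem_zip hp).1
  simp only at h2 ⊢
  omega

-- Source B's best_chain: max over g of f(g); max([]) raises, reached only for an empty block (outside Pre_)
def bestChain (block : List Int) (base : Int) : Int :=
  (PySem.List.max? ((PySem.List.pyRange base (base + (block.length : Int)) 1).map
      (fun g => bestF block base g)) (fun v => v)).getD 0

def solve_alt (n : Int) (arr : List Int) : Int :=
  (PySem.List.max?
    ((PySem.List.pyRange 0 ((arr.length : Int)) 256).map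
      (fun s => bestChain (PySem.List.slice arr (some s) (some (s + 256))) s))
    (fun v => v)).getD 0   -- max over an empty generator raises: empty arr excluded by Pre_

-- ===== PRECONDITION & SPEC =====
-- max([]) raises ValueError in A (and in B); Pre_ excludes only the empty list.
def Pre_solve (n : Int) (arr : List Int) : Prop := arr ≠ []
instance (n : Int) (arr : List Int) : Decidable (Pre_solve n arr) := by unfold Pre_solve; infer_instance
def pvWitness_solve : Int × List Int := (0, [3, 1, 2])

def Spec_solve (n : Int) (arr : List Int) (out : Int) : Prop := out = solve_alt n arr
instance (n : Int) (arr : List Int) (out : Int) : Decidable (Spec_solve n arr out) := by unfold Spec_solve; infer_instance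

-- ===== CLAIM (what is proved, stated in full; the proofs are below) =====
def Claim_equal_solve : Prop := ∀ (n : Int) (arr : List Int), Dom_solve n arr → Pre_solve n arr → Spec_solve n arr (solve n arr)

-- ===== LEMMAS AND PROOFS =====

lemma pvGetD_map_range (g : Nat → Int) (m : Nat) (i : Int) (h0 : 0 ≤ i) (h : i < m) :
    PySem.List.pyGetD ((List.range m).map g) i 0 = g i.toNat := by
  rw [PySem.List.pyGetD_of_nonneg _ _ h0]
  exact PySem.List.getD_map_range g m i.toNat 0 (by omega)

lemma pvSet_map_range (g : Nat → Int) (m t : Nat) (v : Int) (ht : t < m) :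
    ((List.range m).map g).set t v
      = (List.range m).map (fun idx => if idx = t then v else g idx) := by
  apply List.ext_getElem
  · simp
  · intro i h1 h2
    simp only [List.getElem_set, List.getElem_map, List.getElem_range]
    simp only [List.length_map] at h1
    split_ifs with he hi hi
    · simp [he] at hi ⊢
    · omega
    · omega
    · rfl

lemma pvInnerA (arr : List Int) (nn : Nat) (g : Nat → Int) (A la d : Int) (a : Int) (m : Nat)
    (ha : 0 ≤ a) (hb : a + m ≤ nn) :
    (PySem.List.pyRange a (a + (m : Int)) 1).foldl
      (fun dyn j =>
        if PySem.Int.bxor A j < PySem.Int.bxor (PySem.List.pyGetD arr j 0) la then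
          if PySem.List.pyGetD dyn j 0 ≤ d then PySem.List.pySetD dyn j (d + 1) else dyn
        else dyn) ((List.range nn).map g)
    = (List.range nn).map (fun (idx : Nat) =>
        if (a ≤ (idx : Int) ∧ (idx : Int) < a + m) ∧
           PySem.Int.bxor A idx < PySem.Int.bxor (PySem.List.pyGetD arr (idx : Int) 0) la then
          (if g idx ≤ d then d + 1 else g idx)
        else g idx) := by
  induction m with
  | zero =>
    rw [show ((0:Nat):Int) = 0 from rfl, add_zero, PySem.List.pyRange_one_eq_nil le_rfl]
    refine (List.map_congr_left ?_).symm
    intro idx _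
    rw [if_neg]
    rintro ⟨⟨h1, h2⟩, _⟩
    omega
  | succ m ih =>
    have hb' : a + m ≤ nn := by push_cast at hb ⊢; omega
    rw [show a + ((m+1 : Nat) : Int) = (a + (m : Nat)) + 1 by push_cast; ring]
    rw [PySem.List.pyRange_one_succ_right (by omega), List.foldl_append, ih hb']
    set g' := fun (idx : Nat) =>
        if (a ≤ (idx : Int) ∧ (idx : Int) < a + m) ∧
           PySem.Int.bxor A idx < PySem.Int.bxor (PySem.List.pyGetD arr (idx : Int) 0) la then
          (if g idx ≤ d then d + 1 else g idx)
        else g idx with hg'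
    simp only [List.foldl_cons, List.foldl_nil]
    have hlt : a.toNat + m < nn := by push_cast at hb; omega
    have hgt : g' (a.toNat + m) = g (a.toNat + m) := by
      rw [hg']; simp only
      rw [if_neg]; rintro ⟨⟨h1, h2⟩, _⟩; omega
    have hwin : ∀ idx : Nat, idx < nn → idx ≠ a.toNat + m →
        (((a ≤ (idx:Int) ∧ (idx:Int) < a + (m:Int) + 1) ∧
           PySem.Int.bxor A idx < PySem.Int.bxor (PySem.List.pyGetD arr (idx : Int) 0) la) ↔
         ((a ≤ (idx:Int) ∧ (idx:Int) < a + (m:Int)) ∧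
           PySem.Int.bxor A idx < PySem.Int.bxor (PySem.List.pyGetD arr (idx : Int) 0) la)) := by
      intro idx _ he
      constructor <;> rintro ⟨⟨h1, h2⟩, h3⟩ <;> exact ⟨⟨h1, by omega⟩, h3⟩
    by_cases hc : PySem.Int.bxor A (a + (m:Int)) < PySem.Int.bxor (PySem.List.pyGetD arr (a + (m:Int)) 0) la
    · rw [if_pos hc, pvGetD_map_range g' nn _ (by omega) (by push_cast; omega)]
      rw [show (a + (m:Int)).toNat = a.toNat + m from by omega, hgt]
      by_cases hd : g (a.toNat + m) ≤ d
      · rw [if_pos hd, PySem.List.pySetD_of_nonneg _ _ (by omega)]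
        rw [show (a + (m:Int)).toNat = a.toNat + m from by omega]
        rw [pvSet_map_range _ _ _ _ hlt]
        refine List.map_congr_left ?_
        intro idx hidx
        have hidx' : idx < nn := List.mem_range.1 hidx
        by_cases he : idx = a.toNat + m
        · rw [if_pos he]
          have hC : PySem.Int.bxor A idx < PySem.Int.bxor (PySem.List.pyGetD arr (idx : Int) 0) la := by
            rw [show ((idx:Nat):Int) = a + (m:Int) from by omega]; exact hc
          rw [if_pos ⟨⟨by omega, by omega⟩, hC⟩, if_pos (by rw [he]; exact hd)]
        · rw [if_neg he, hg']
          simp only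
          exact (if_congr (hwin idx hidx' he) rfl rfl).symm
      · rw [if_neg hd]
        refine List.map_congr_left ?_
        intro idx hidx
        have hidx' : idx < nn := List.mem_range.1 hidx
        rw [hg']; simp only
        by_cases he : idx = a.toNat + m
        · have hC : PySem.Int.bxor A idx < PySem.Int.bxor (PySem.List.pyGetD arr (idx : Int) 0) la := by
            rw [show ((idx:Nat):Int) = a + (m:Int) from by omega]; exact hc
          rw [if_neg (by rintro ⟨⟨h1, h2⟩, _⟩; omega),
              if_pos ⟨⟨by omega, by omega⟩, hC⟩, if_neg (by rw [he]; exact hd)]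
        · exact (if_congr (hwin idx hidx' he) rfl rfl).symm
    · rw [if_neg hc]
      refine List.map_congr_left ?_
      intro idx hidx
      have hidx' : idx < nn := List.mem_range.1 hidx
      rw [hg']; simp only
      by_cases he : idx = a.toNat + m
      · rw [if_neg (by rintro ⟨⟨h1, h2⟩, _⟩; omega), if_neg]
        rintro ⟨_, h3⟩
        rw [show ((idx:Nat):Int) = a + (m:Int) from by omega] at h3
        exact hc h3
      · exact (if_congr (hwin idx hidx' he) rfl rfl).symm

def pvF (arr : List Int) (j : Nat) : Int :=
  (PySem.List.pyRange ((j : Int) - PySem.Int.mod (j : Int) 256) (j : Int) 1).attach.foldl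
    (fun v i =>
      if PySem.Int.bxor (PySem.List.pyGetD arr i.1 0) (j : Int) <
         PySem.Int.bxor (PySem.List.pyGetD arr (j : Int) 0) i.1 then
        max v (pvF arr i.1.toNat + 1)
      else v) 1
termination_by j
decreasing_by
  have h := PySem.List.mem_pyRange_one.1 i.2
  have hm : PySem.Int.mod ((j : Nat) : Int) 256 = ((j % 256 : Nat) : Int) := by
    exact_mod_cast PySem.Int.mod_natCast j 256
  omega

def pvPart (arr : List Int) (k j : Nat) : Int :=
  (PySem.List.pyRange ((j : Int) - PySem.Int.mod (j : Int) 256) (min (j : Int) (k : Int)) 1).foldl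
    (fun v i =>
      if PySem.Int.bxor (PySem.List.pyGetD arr i 0) (j : Int) <
         PySem.Int.bxor (PySem.List.pyGetD arr (j : Int) 0) i then
        max v (pvF arr i.toNat + 1)
      else v) 1

lemma pvMod (j : Nat) : PySem.Int.mod (j : Int) 256 = ((j % 256 : Nat) : Int) := by
  exact_mod_cast PySem.Int.mod_natCast j 256

lemma pvPart_succ (arr : List Int) (k idx : Nat) (hk : k < arr.length) (hidx : idx < arr.length) :
    pvPart arr (k + 1) idx =
      if (((k : Int) + 1 ≤ (idx : Int) ∧
            (idx : Int) < min ((arr.length : Int)) ((k : Int) - PySem.Int.mod (k : Int) 256 + 256)) ∧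
          PySem.Int.bxor (PySem.List.pyGetD arr (k : Int) 0) (idx : Int) <
            PySem.Int.bxor (PySem.List.pyGetD arr (idx : Int) 0) (k : Int)) then
        (if pvPart arr k idx ≤ pvF arr k then pvF arr k + 1 else pvPart arr k idx)
      else pvPart arr k idx := by
  simp only [pvPart]
  rcases Nat.lt_or_ge idx (k + 1) with h | h
  · rw [show min ((idx:Int)) (((k+1:Nat)):Int) = (idx:Int) from by push_cast; omega,
        show min ((idx:Int)) ((k:Nat):Int) = (idx:Int) from by push_cast; omega]
    rw [if_neg]
    rintro ⟨⟨h1, _⟩, _⟩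
    omega
  · rw [show min ((idx:Int)) (((k+1:Nat)):Int) = ((k:Nat):Int) + 1 from by push_cast; omega,
        show min ((idx:Int)) ((k:Nat):Int) = ((k:Nat):Int) from by push_cast; omega]
    by_cases hlt : (idx : Int) < min ((arr.length : Int)) ((k : Int) - PySem.Int.mod (k : Int) 256 + 256)
    · have h2 : (idx:Int) < (k:Int) - PySem.Int.mod (k:Int) 256 + 256 :=
        lt_of_lt_of_le hlt (min_le_right _ _)
      have hbs : (idx:Int) - PySem.Int.mod (idx:Int) 256 = (k:Int) - PySem.Int.mod (k:Int) 256 := by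
        rw [pvMod, pvMod]; rw [pvMod] at h2; omega
      rw [hbs, PySem.List.pyRange_one_succ_right (by rw [pvMod]; omega), List.foldl_append]
      simp only [List.foldl_cons, List.foldl_nil, Int.toNat_natCast]
      by_cases hC : PySem.Int.bxor (PySem.List.pyGetD arr (k : Int) 0) (idx : Int) <
          PySem.Int.bxor (PySem.List.pyGetD arr (idx : Int) 0) (k : Int)
      · rw [if_pos hC, if_pos ⟨⟨by omega, hlt⟩, hC⟩]
        split_ifs with h3
        · omega
        · omega
      · rw [if_neg hC, if_neg (by rintro ⟨_, h3⟩; exact hC h3)]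
    · have h2 : ((arr.length:Int)) ≤ (idx:Int) ∨ (k:Int) - PySem.Int.mod (k:Int) 256 + 256 ≤ (idx:Int) :=
        min_le_iff.1 (not_lt.1 hlt)
      have h3 : (k:Int) - PySem.Int.mod (k:Int) 256 + 256 ≤ (idx:Int) := by
        rcases h2 with h2 | h2
        · exfalso; omega
        · exact h2
      have hge : ((k:Nat):Int) + 1 ≤ (idx:Int) - PySem.Int.mod (idx:Int) 256 := by
        rw [pvMod]; rw [pvMod] at h3; omega
      rw [PySem.List.pyRange_one_eq_nil hge, PySem.List.pyRange_one_eq_nil (by omega)]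
      rw [if_neg]
      rintro ⟨⟨_, hx⟩, _⟩
      exact hlt hx

lemma pvF_unfold (arr : List Int) (j : Nat) :
    pvF arr j = (PySem.List.pyRange ((j : Int) - PySem.Int.mod (j : Int) 256) (j : Int) 1).foldl
      (fun v i =>
        if PySem.Int.bxor (PySem.List.pyGetD arr i 0) (j : Int) <
           PySem.Int.bxor (PySem.List.pyGetD arr (j : Int) 0) i then
          max v (pvF arr i.toNat + 1)
        else v) 1 := by
  rw [pvF.eq_def]
  exact List.foldl_attach (f := fun v i =>
    if PySem.Int.bxor (PySem.List.pyGetD arr i 0) (j : Int) <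
       PySem.Int.bxor (PySem.List.pyGetD arr (j : Int) 0) i then
      max v (pvF arr i.toNat + 1)
    else v)

lemma pvPart_final (arr : List Int) (n j : Nat) (h : j ≤ n) : pvPart arr n j = pvF arr j := by
  rw [pvPart, pvF_unfold, min_eq_left (by exact_mod_cast h)]

lemma pvPart_zero (arr : List Int) (j : Nat) : pvPart arr 0 j = 1 := by
  rw [pvPart]
  rw [PySem.List.pyRange_one_eq_nil (by rw [pvMod]; omega)]
  rfl

def pvStepA (arr : List Int) (dyn : List Int) (lasti : Int) : List Int :=
  let endj := min ((arr.length : Int)) (lasti - PySem.Int.mod lasti 256 + 256)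
  let arrlasti := PySem.List.pyGetD arr lasti 0
  let dynlasti := PySem.List.pyGetD dyn lasti 0
  let dynlasti1 := dynlasti + 1
  (PySem.List.pyRange (lasti + 1) endj 1).foldl (fun dyn j =>
    if PySem.Int.bxor arrlasti j < PySem.Int.bxor (PySem.List.pyGetD arr j 0) lasti then
      if PySem.List.pyGetD dyn j 0 ≤ dynlasti then PySem.List.pySetD dyn j dynlasti1
      else dyn
    else dyn) dyn

lemma pvOuterA (arr : List Int) (k : Nat) (hk : k ≤ arr.length) :
    (PySem.List.pyRange 0 (k : Int) 1).foldl (fun dyn j => pvStepA arr dyn j)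
        ((List.range arr.length).map (fun _ => (1 : Int)))
    = (List.range arr.length).map (fun idx => pvPart arr k idx) := by
  induction k with
  | zero =>
    rw [show ((0:Nat):Int) = 0 from rfl, PySem.List.pyRange_one_eq_nil le_rfl]
    simp only [List.foldl_nil]
    exact List.map_congr_left fun idx _ => (pvPart_zero arr idx).symm
  | succ k ih =>
    have hk' : k ≤ arr.length := by omega
    rw [show (((k+1:Nat)):Int) = ((k:Nat):Int) + 1 from by push_cast; ring]
    rw [PySem.List.pyRange_one_succ_right (by omega), List.foldl_append, ih hk']
    simp only [List.foldl_cons, List.foldl_nil]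
    simp only [pvStepA]
    have hdyn : PySem.List.pyGetD ((List.range arr.length).map (fun idx => pvPart arr k idx))
        ((k:Nat):Int) 0 = pvPart arr k k := by
      rw [pvGetD_map_range _ _ _ (by omega) (by omega)]
      simp
    rw [hdyn, pvPart_final arr k k le_rfl]
    set e := min ((arr.length : Int)) (((k:Nat):Int) - PySem.Int.mod ((k:Nat):Int) 256 + 256) with hE
    have he1 : ((k:Nat):Int) + 1 ≤ e := le_min (by omega) (by rw [pvMod]; omega)
    have he2 : e ≤ ((arr.length : Nat) : Int) := min_le_left _ _
    have hm : ((k:Nat):Int) + 1 + (((e - (((k:Nat):Int)+1)).toNat : Nat) : Int) = e := by omega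
    rw [← hm]
    rw [pvInnerA arr arr.length (fun idx => pvPart arr k idx)
      (PySem.List.pyGetD arr ((k:Nat):Int) 0) ((k:Nat):Int) (pvF arr k) (((k:Nat):Int) + 1)
      ((e - (((k:Nat):Int)+1)).toNat) (by omega) (by omega)]
    refine List.map_congr_left ?_
    intro idx hidx
    have hidx' : idx < arr.length := List.mem_range.1 hidx
    rw [pvPart_succ arr k idx (by omega) hidx', ← hE, hm]

lemma pvSolveA (n : Int) (arr : List Int) :
    solve n arr
      = (PySem.List.max? ((List.range arr.length).map (fun idx => pvPart arr arr.length idx))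
          (fun x => x)).getD 0 := by
  have hrepl : List.replicate arr.length (1:Int) = (List.range arr.length).map (fun _ => 1) := by
    simp [List.map_const']
  simp only [solve]
  rw [PySem.List.enumerate_eq_map_pyRange (List.replicate arr.length (1:Int)) 1, List.foldl_map]
  simp only [PySem.List.len_eq, List.length_replicate]
  rw [hrepl]
  exact congrArg (fun l => (PySem.List.max? l (fun x => x)).getD 0)
    (pvOuterA arr arr.length le_rfl)

-- ===== B-side lemmas =====

lemma pvFoldSplit (l : List Nat) (p : Nat → Prop) [DecidablePred p] (g : Nat → Int) :
    l.foldl (fun v k => if p k then max v (g k + 1) else v) 1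
      = 1 + l.foldl (fun b k => if p k then max b (g k) else b) 0 := by
  have H : ∀ m : Int, l.foldl (fun v k => if p k then max v (g k + 1) else v) (1 + m)
      = 1 + l.foldl (fun b k => if p k then max b (g k) else b) m := by
    induction l with
    | nil => intro m; rfl
    | cons a l ih =>
      intro m
      simp only [List.foldl_cons]
      by_cases h : p a
      · rw [if_pos h, if_pos h, show max (1+m) (g a + 1) = 1 + max m (g a) from by omega, ih]
      · rw [if_neg h, if_neg h, ih]
  simpa using H 0

lemma pvZipMapRange (f : Nat → Int) (block : List Int) (j : Nat) (h : j ≤ block.length) :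
    ((List.range j).map f).zip block
      = (List.range j).map (fun k => (f k, PySem.List.pyGetD block ((k:Nat):Int) 0)) := by
  apply List.ext_getElem
  · simp; omega
  · intro i h1 h2
    simp only [List.length_zip, List.length_map, List.length_range] at h1
    have hi : i < j := by omega
    simp only [List.getElem_zip, List.getElem_map, List.getElem_range]
    rw [PySem.List.pyGetD_eq_getElem _ _ (by omega) (by simp; omega)]
    simp

lemma pvBlockLen (arr : List Int) (s : Nat) :
    (PySem.List.slice arr (some ((s:Nat):Int)) (some (((s:Nat):Int) + 256))).length
      = min 256 (arr.length - s) := by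
  rw [show ((s:Nat):Int) + 256 = (((s + 256 : Nat)):Int) from by push_cast; ring,
      PySem.List.slice_natCast]
  simp [List.length_take, List.length_drop]

lemma pvBlockGet (arr : List Int) (s i : Nat) (h1 : i < 256) (h2 : s + i < arr.length) :
    PySem.List.pyGetD (PySem.List.slice arr (some ((s:Nat):Int)) (some (((s:Nat):Int) + 256)))
        ((i:Nat):Int) 0
      = PySem.List.pyGetD arr (((s + i : Nat)):Int) 0 := by
  rw [show ((s:Nat):Int) + 256 = (((s + 256 : Nat)):Int) from by push_cast; ring,
      PySem.List.slice_natCast]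
  rw [PySem.List.pyGetD_eq_getElem _ _ (by omega)
      (by simp [List.length_take, List.length_drop]; omega)]
  rw [PySem.List.pyGetD_eq_getElem _ _ (by omega) (by exact_mod_cast h2)]
  simp only [Int.toNat_natCast]
  rw [List.getElem_take, List.getElem_drop]

lemma pvBestF_eq_pvF (arr : List Int) (t : Nat) :
    ∀ j, j < 256 → 256 * t + j < arr.length →
      bestF (PySem.List.slice arr (some (((256*t : Nat)):Int)) (some ((((256*t:Nat)):Int) + 256)))
        (((256*t:Nat)):Int) ((((256*t:Nat)):Int) + ((j:Nat):Int)) = pvF arr (256 * t + j) := by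
  intro j
  induction j using Nat.strong_induction_on with
  | _ j ih =>
    intro hj hl
    set block := PySem.List.slice arr (some (((256*t : Nat)):Int))
        (some ((((256*t:Nat)):Int) + 256)) with hB
    have hbl : block.length = min 256 (arr.length - 256*t) := pvBlockLen arr (256*t)
    have hjb : j ≤ block.length := by omega
    -- left-hand side: unfold one step of the recursion and normalise to a fold over range j
    rw [bestF.eq_def]
    rw [List.foldl_attach (l := (PySem.List.pyRange (((256*t:Nat)):Int)
          ((((256*t:Nat)):Int) + ((j:Nat):Int)) 1).zip block)
        (f := fun best q =>
          if PySem.Int.bxor q.2 ((((256*t:Nat)):Int) + ((j:Nat):Int)) <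
              PySem.Int.bxor (PySem.List.pyGetD block
                ((((256*t:Nat)):Int) + ((j:Nat):Int) - (((256*t:Nat)):Int)) 0) q.1 then
            max best (bestF block (((256*t:Nat)):Int) q.1)
          else best) (b := 0)]
    rw [show (((256*t:Nat)):Int) + ((j:Nat):Int) - (((256*t:Nat)):Int) = ((j:Nat):Int) from by ring]
    rw [PySem.List.pyRange_one]
    rw [show ((((256*t:Nat)):Int) + ((j:Nat):Int) - (((256*t:Nat)):Int)).toNat = j from by
      push_cast; omega]
    rw [pvZipMapRange (fun k => (((256*t:Nat)):Int) + ((k:Nat):Int)) block j hjb]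
    rw [List.foldl_map]
    -- right-hand side: unfold pvF and normalise to a fold over range j
    rw [pvF_unfold]
    have hmod : PySem.Int.mod (((256*t+j : Nat)):Int) 256 = ((j:Nat):Int) := by
      rw [pvMod]
      congr 1
      omega
    rw [hmod]
    rw [show (((256*t+j : Nat)):Int) - ((j:Nat):Int) = (((256*t : Nat)):Int) from by push_cast; ring]
    rw [PySem.List.pyRange_one]
    rw [show ((((256*t+j : Nat)):Int) - (((256*t : Nat)):Int)).toNat = j from by push_cast; omega]
    rw [List.foldl_map]
    rw [pvFoldSplit (List.range j)
      (fun k => PySem.Int.bxor (PySem.List.pyGetD arr ((((256*t:Nat)):Int) + ((k:Nat):Int)) 0)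
          (((256*t+j : Nat)):Int) <
        PySem.Int.bxor (PySem.List.pyGetD arr (((256*t+j : Nat)):Int) 0)
          ((((256*t:Nat)):Int) + ((k:Nat):Int)))
      (fun k => pvF arr ((((256*t:Nat)):Int) + ((k:Nat):Int)).toNat)]
    refine congrArg (HAdd.hAdd (1 : Int)) ?_
    refine PySem.List.foldl_congr_mem _ _ _ _ ?_
    intro acc k hk
    have hkj : k < j := List.mem_range.1 hk
    have hcast : (((256*t : Nat)):Int) + ((k:Nat):Int) = (((256*t+k : Nat)):Int) := by
      push_cast; ring
    have hcastj : (((256*t : Nat)):Int) + ((j:Nat):Int) = (((256*t+j : Nat)):Int) := by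
      push_cast; ring
    rw [hB]
    rw [pvBlockGet arr (256*t) k (by omega) (by omega),
        pvBlockGet arr (256*t) j hj (by omega)]
    rw [hcast, hcastj]
    by_cases hC : PySem.Int.bxor (PySem.List.pyGetD arr (((256*t+k : Nat)):Int) 0)
        (((256*t+j : Nat)):Int) <
        PySem.Int.bxor (PySem.List.pyGetD arr (((256*t+j : Nat)):Int) 0) (((256*t+k : Nat)):Int)
    · rw [if_pos hC, if_pos hC, Int.toNat_natCast]
      have hb := ih k hkj (by omega) (by omega)
      rw [hcast] at hb
      rw [hB] at hb
      exact congrArg (max acc) hb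
    · rw [if_neg hC, if_neg hC]

lemma pvBestChain (arr : List Int) (t : Nat) (h : 256 * t < arr.length) :
    bestChain (PySem.List.slice arr (some (((256*t : Nat)):Int)) (some ((((256*t:Nat)):Int) + 256)))
        (((256*t:Nat)):Int)
      = (PySem.List.max? ((List.range (min 256 (arr.length - 256*t))).map
          (fun j => pvF arr (256*t + j))) (fun v => v)).getD 0 := by
  rw [bestChain, pvBlockLen]
  rw [show (((256*t:Nat)):Int) + ((min 256 (arr.length - 256*t) : Nat) : Int)
        = (((256*t + min 256 (arr.length - 256*t) : Nat)):Int) from by push_cast; ring]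
  rw [show PySem.List.pyRange (((256*t:Nat)):Int)
        ((((256*t + min 256 (arr.length - 256*t) : Nat)):Int)) 1
      = (List.range (min 256 (arr.length - 256*t))).map
          (fun k => (((256*t:Nat)):Int) + ((k:Nat):Int)) from by
    rw [PySem.List.pyRange_one]
    congr 2
    omega]
  rw [List.map_map]
  congr 2
  refine List.map_congr_left ?_
  intro k hk
  have hk' := List.mem_range.1 hk
  simp only [Function.comp]
  exact pvBestF_eq_pvF arr t k (by omega) (by omega)

lemma pvSolveAlt (n : Int) (arr : List Int) (hne : arr ≠ []) :
    solve_alt n arr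
      = (PySem.List.max? ((List.range arr.length).map (pvF arr)) (fun v => v)).getD 0 := by
  have hlen : 0 < arr.length := List.length_pos_iff.2 hne
  set L := (List.range arr.length).map (pvF arr) with hL
  set Outer := (PySem.List.pyRange 0 ((arr.length : Int)) 256).map
      (fun s => bestChain (PySem.List.slice arr (some s) (some (s + 256))) s) with hO
  have hLne : L ≠ [] := by
    rw [hL]; simp; omega
  have hOne : Outer ≠ [] := by
    rw [hO]
    intro hnil
    have h0 : (0 : Int) ∈ PySem.List.pyRange 0 ((arr.length : Int)) 256 := by
      rw [PySem.List.mem_pyRange_iff_of_pos (by omega)]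
      refine ⟨le_rfl, by exact_mod_cast hlen, by simp⟩
    have := List.mem_map_of_mem (f := fun s => bestChain (PySem.List.slice arr (some s) (some (s + 256))) s) h0
    rw [hnil] at this
    exact List.not_mem_nil this
  obtain ⟨m1, hm1⟩ : ∃ m1, PySem.List.max? L (fun v => v) = some m1 := by
    cases hq : PySem.List.max? L (fun v => v) with
    | none => exact absurd ((PySem.List.max?_eq_none_iff _ _).1 hq) hLne
    | some m => exact ⟨m, rfl⟩
  obtain ⟨m2, hm2⟩ : ∃ m2, PySem.List.max? Outer (fun v => v) = some m2 := by
    cases hq : PySem.List.max? Outer (fun v => v) with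
    | none => exact absurd ((PySem.List.max?_eq_none_iff _ _).1 hq) hOne
    | some m => exact ⟨m, rfl⟩
    -- describe a member of starts as 256*t
  have hstart : ∀ s : Int, s ∈ PySem.List.pyRange 0 ((arr.length : Int)) 256 →
      ∃ t : Nat, s = (((256*t : Nat)):Int) ∧ 256 * t < arr.length := by
    intro s hs
    rw [PySem.List.mem_pyRange_iff_of_pos (by omega)] at hs
    obtain ⟨hs0, hslen, hdvd⟩ := hs
    simp only [sub_zero] at hdvd
    obtain ⟨c, hc⟩ := hdvd
    refine ⟨c.toNat, by omega, by omega⟩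
  -- the block maximum lies in L, and every pvF value is ≤ its block maximum
  have hblock : ∀ t : Nat, 256 * t < arr.length →
      (bestChain (PySem.List.slice arr (some (((256*t : Nat)):Int))
          (some ((((256*t:Nat)):Int) + 256))) (((256*t:Nat)):Int)) ∈ L ∧
      ∀ j, j < min 256 (arr.length - 256*t) →
        pvF arr (256*t + j) ≤ bestChain (PySem.List.slice arr (some (((256*t : Nat)):Int))
          (some ((((256*t:Nat)):Int) + 256))) (((256*t:Nat)):Int) := by
    intro t ht
    rw [pvBestChain arr t ht]
    set Bs := (List.range (min 256 (arr.length - 256*t))).map (fun j => pvF arr (256*t + j)) with hBs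
    have hBne : Bs ≠ [] := by rw [hBs]; simp; omega
    obtain ⟨mb, hmb⟩ : ∃ mb, PySem.List.max? Bs (fun v => v) = some mb := by
      cases hq : PySem.List.max? Bs (fun v => v) with
      | none => exact absurd ((PySem.List.max?_eq_none_iff _ _).1 hq) hBne
      | some m => exact ⟨m, rfl⟩
    rw [hmb]
    simp only [Option.getD_some]
    constructor
    · have := PySem.List.max?_mem hmb
      rw [hBs] at this
      obtain ⟨j, hj, hjv⟩ := List.mem_map.1 this
      have hj' := List.mem_range.1 hj
      rw [hL]
      exact hjv ▸ List.mem_map_of_mem (List.mem_range.2 (by omega))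
    · intro j hj
      exact PySem.List.max?_isMax hmb _ (List.mem_map_of_mem (List.mem_range.2 hj))
  have h21 : m2 ≤ m1 := by
    have hm2mem := PySem.List.max?_mem hm2
    rw [hO] at hm2mem
    obtain ⟨s, hs, hsv⟩ := List.mem_map.1 hm2mem
    obtain ⟨t, hteq, ht⟩ := hstart s hs
    rw [hteq] at hsv
    have := (hblock t ht).1
    rw [hsv] at this
    exact PySem.List.max?_isMax hm1 _ this
  have h12 : m1 ≤ m2 := by
    have hm1mem := PySem.List.max?_mem hm1
    rw [hL] at hm1mem
    obtain ⟨idx, hidx, hidxv⟩ := List.mem_map.1 hm1mem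
    have hidx' := List.mem_range.1 hidx
    set t := idx / 256 with hT
    have ht : 256 * t < arr.length := by omega
    have hidxeq : idx = 256 * t + idx % 256 := by omega
    have hle := (hblock t ht).2 (idx % 256) (by omega)
    rw [← hidxeq] at hle
    have hmem : bestChain (PySem.List.slice arr (some (((256*t : Nat)):Int))
        (some ((((256*t:Nat)):Int) + 256))) (((256*t:Nat)):Int) ∈ Outer := by
      rw [hO]
      have hsmem : ((((256*t : Nat)):Int)) ∈ PySem.List.pyRange 0 ((arr.length : Int)) 256 := by
        rw [PySem.List.mem_pyRange_iff_of_pos (by omega)]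
        refine ⟨by omega, by exact_mod_cast ht, ⟨(t:Int), by push_cast; ring⟩⟩
      exact List.mem_map_of_mem hsmem
    have := PySem.List.max?_isMax hm2 _ hmem
    calc m1 = pvF arr idx := hidxv.symm
      _ ≤ _ := hle
      _ ≤ m2 := this
  rw [solve_alt]
  rw [← hO, hm1, hm2]
  simp only [Option.getD_some]
  omega

-- ===== VERDICT (by name: the statement is the Claim_ definition above) =====
theorem solve_spec : Claim_equal_solve := by
  intro n arr _ hpre
  unfold Spec_solve
  rw [pvSolveA, pvSolveAlt n arr hpre]
  congr 2
  exact List.map_congr_left fun idx h =>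
    pvPart_final arr arr.length idx (le_of_lt (List.mem_range.1 h))
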